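-- pv_equiv track=rewrite | github.com/samgillespie/SamGillespieAOC2019 | code/question16.py | execute_phase
-- ===== SOURCE A (Python) =====
-- def extract_ones_position(integer):
--     return abs(integer) % 10
--
-- def sequence(sequence_pattern, repeat_number):
--     pattern_index = 0
--     number_occurred = 1
--     while True:
--         if number_occurred >= repeat_number:
--             pattern_index += 1
--             number_occurred = 0
--             if pattern_index >= len(sequence_pattern):
--                 pattern_index = 0
--
--         yield sequence_pattern[pattern_index]
--         number_occurred += 1
--
-- def execute_phase(input_data, sequence_pattern):
--     output = []
--     for element_num in range(1, len(input_data)+1):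
--         generator = sequence(sequence_pattern, element_num)
--         summation = 0
--         for value in input_data:
--             sequence_value = generator.send(None) * value
--             summation += sequence_value
--         output.append(extract_ones_position(summation))
--     return output
-- ===== SOURCE B (Python) =====
-- def execute_phase(input_data, sequence_pattern):
--     # Prefix sums: for output position k (1-based) the pattern coefficient is
--     # constant on blocks of k consecutive inputs, so each block is summed in O(1).
--     n = len(input_data)
--     prefix = [0]
--     for v in input_data:
--         prefix.append(prefix[-1] + v)
--     pattern_length = len(sequence_pattern)
--     output = []
--     for k in range(1, n + 1):
--         # input_data[j] carries sequence_pattern[((j+1)//k) % pattern_length];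
--         # block b >= 1 covers j in [b*k-1, b*k+k-2], block 0 covers j < k-1.
--         total = sequence_pattern[0] * prefix[k - 1]
--         b, start = 1, k - 1
--         while start < n:
--             end = min(start + k, n)
--             total += sequence_pattern[b % pattern_length] * (prefix[end] - prefix[start])
--             b, start = b + 1, end
--         output.append(abs(total) % 10)
--     return output
-- ===== Notes on version B (the rewrite author's own statement) =====
-- stated objective: faster
-- what changed: Replaces the per-element pattern generator with a prefix-sum array: the pattern coefficient for output position k is constant on blocks of k consecutive inputs, so each block is summed in O(1) and row k costs O(n/k), giving O(n log n) overall instead of O(n^2).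
import Mathlib
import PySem

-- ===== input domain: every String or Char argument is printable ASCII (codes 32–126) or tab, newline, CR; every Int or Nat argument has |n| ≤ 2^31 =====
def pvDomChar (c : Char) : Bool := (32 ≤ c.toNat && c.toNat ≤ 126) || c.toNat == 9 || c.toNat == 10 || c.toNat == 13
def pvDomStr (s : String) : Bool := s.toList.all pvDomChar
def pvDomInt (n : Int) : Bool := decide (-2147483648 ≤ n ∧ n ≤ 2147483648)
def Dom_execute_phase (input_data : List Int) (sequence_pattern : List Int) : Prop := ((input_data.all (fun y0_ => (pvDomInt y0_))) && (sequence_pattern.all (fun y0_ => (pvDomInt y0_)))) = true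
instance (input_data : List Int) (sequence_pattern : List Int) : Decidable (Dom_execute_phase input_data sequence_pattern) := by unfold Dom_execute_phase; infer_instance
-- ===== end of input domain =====

-- B replaces A's per-element pattern generator by a pfx-sum array and O(1) block sums
-- (objective: faster; a timing run measures the asymptotic speed-up).


-- ===== PORT A =====
def extract_ones_position (integer : Int) : Int := |integer| % 10

-- One step of A's generator `sequence`: (yielded value, new (pattern_index, number_occurred)).
-- The pattern lookup uses pyGet?; its `none` case (Python IndexError, empty pattern with
-- nonempty input) is defaulted to 0 here — exactly those inputs are excluded by Pre_execute_phase.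
def seqNext (sequence_pattern : List Int) (repeat_number : Int) (st : Int × Int) : Int × (Int × Int) :=
  let st :=
    if st.2 ≥ repeat_number then
      let pattern_index := st.1 + 1
      let pattern_index := if pattern_index ≥ (sequence_pattern.length : Int) then 0 else pattern_index
      (pattern_index, (0 : Int))
    else st
  ((PySem.List.pyGet? sequence_pattern st.1).getD 0, (st.1, st.2 + 1))

def execute_phase (input_data : List Int) (sequence_pattern : List Int) : List Int :=
  (PySem.List.pyRange 1 ((input_data.length : Int) + 1) 1).foldl
    (fun output element_num =>
      let r := input_data.foldl
        (fun (acc : (Int × Int) × Int) value =>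
          let y := seqNext sequence_pattern element_num acc.1
          (y.2, acc.2 + y.1 * value))
        (((0 : Int), (1 : Int)), (0 : Int))
      output ++ [extract_ones_position r.2])
    []

-- ===== PORT B =====
-- prefix = [0]; for v in input_data: pfx.append(pfx[-1] + v)
def buildPrefix (input_data : List Int) : List Int :=
  input_data.foldl (fun p v => p ++ [(PySem.List.pyGet? p (-1)).getD 0 + v]) [0]

-- the `while start < n` loop of Source B; fuel only bounds the iteration count
-- (the loop runs at most n times since start strictly increases), it never changes the value.
def blockLoop (sequence_pattern pfx : List Int) (n k : Int) :
    Nat → Int → Int → Int → Int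
  | 0, _, _, total => total
  | fuel+1, b, start, total =>
    if start < n then
      let e := min (start + k) n
      blockLoop sequence_pattern pfx n k fuel (b+1) e
        (total +
          (PySem.List.pyGet? sequence_pattern
            (PySem.Int.mod b (sequence_pattern.length : Int))).getD 0 *
          ((PySem.List.pyGet? pfx e).getD 0 - (PySem.List.pyGet? pfx start).getD 0))
    else total

def execute_phase_alt (input_data : List Int) (sequence_pattern : List Int) : List Int :=
  let n : Int := input_data.length
  let pfx := buildPrefix input_data
  (PySem.List.pyRange 1 (n + 1) 1).foldl
    (fun output k =>
      let total := (PySem.List.pyGet? sequence_pattern 0).getD 0 *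
        (PySem.List.pyGet? pfx (k - 1)).getD 0
      let total := blockLoop sequence_pattern pfx n k input_data.length 1 (k - 1) total
      output ++ [|total| % 10])
    []

-- ===== PRECONDITION & SPEC =====
-- Pre_ excludes only the inputs on which the Python A raises (IndexError: an empty
-- sequence_pattern indexed while input_data is nonempty); B raises there too.
def Pre_execute_phase (input_data : List Int) (sequence_pattern : List Int) : Prop :=
  input_data = [] ∨ sequence_pattern ≠ []
instance (input_data : List Int) (sequence_pattern : List Int) : Decidable (Pre_execute_phase input_data sequence_pattern) := by unfold Pre_execute_phase; infer_instance

def pvWitness_execute_phase : List Int × List Int := ([1, 2, 3, 4, 5], [0, 1, 0, -1])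

def Spec_execute_phase (input_data : List Int) (sequence_pattern : List Int) (out : List Int) : Prop := out = execute_phase_alt input_data sequence_pattern
instance (input_data : List Int) (sequence_pattern : List Int) (out : List Int) : Decidable (Spec_execute_phase input_data sequence_pattern out) := by unfold Spec_execute_phase; infer_instance

-- ===== CLAIM (what is proved, stated in full; the proofs are below) =====
def Claim_equal_execute_phase : Prop := ∀ (input_data : List Int) (sequence_pattern : List Int), Dom_execute_phase input_data sequence_pattern → Pre_execute_phase input_data sequence_pattern → Spec_execute_phase input_data sequence_pattern (execute_phase input_data sequence_pattern)

-- ===== LEMMAS AND PROOFS =====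

-- the common specification of row k (1-based): position j carries coefficient
-- sequence_pattern[((j+1)/k) % L]
def specSum (pat : List Int) (k : Nat) : Nat → List Int → Int
  | _, [] => 0
  | j, v :: r => pat.getD (((j + 1) / k) % pat.length) 0 * v + specSum pat k (j + 1) r

-- A's generator state after j yields with repeat_number k
def stateOf (k L j : Nat) : Int × Int := (((j / k) % L : Nat), ((j % k : Nat) : Int) + 1)

-- Nat division stepping: crossing a block boundary
lemma succ_div_mod_of_mod_eq (k j : Nat) (hk : 0 < k) (h : j % k = k - 1) :
    (j + 1) / k = j / k + 1 ∧ (j + 1) % k = 0 := by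
  have hmod : (j + 1) % k = 0 := by
    rw [← Nat.mod_add_mod, h, Nat.sub_add_cancel hk, Nat.mod_self]
  refine ⟨?_, hmod⟩
  rw [Nat.succ_div, if_pos (Nat.dvd_of_mod_eq_zero hmod)]

lemma succ_div_mod_of_mod_lt (k j : Nat) (h : j % k + 1 < k) :
    (j + 1) / k = j / k ∧ (j + 1) % k = j % k + 1 := by
  have hmod : (j + 1) % k = j % k + 1 := by
    rw [← Nat.mod_add_mod]; exact Nat.mod_eq_of_lt h
  refine ⟨?_, hmod⟩
  rw [Nat.succ_div, if_neg ?_]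
  · omega
  · intro hd
    have := Nat.mod_eq_zero_of_dvd hd
    omega

-- one generator step from the canonical state
lemma seqNext_stateOf (pat : List Int) (k j : Nat) (hp : pat ≠ []) (hk : 0 < k) :
    seqNext pat (k : Int) (stateOf k pat.length j) =
      (pat.getD (((j + 1) / k) % pat.length) 0, stateOf k pat.length (j + 1)) := by
  have hL : 0 < pat.length := List.length_pos_iff.mpr hp
  have hjk : j % k < k := Nat.mod_lt _ hk
  have hjL : (j / k) % pat.length < pat.length := Nat.mod_lt _ hL
  have key : ∀ (idx : Nat), (PySem.List.pyGet? pat ((idx : Nat) : Int)).getD 0 = pat.getD idx 0 :=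
    fun idx => by rw [PySem.List.pyGet?_natCast, List.getD_eq_getElem?_getD]
  simp only [seqNext, stateOf]
  split_ifs with h1 h2
  · -- number_occurred ≥ k and the pattern index wraps to 0
    have hge : j % k = k - 1 := by omega
    obtain ⟨hdiv, hmod⟩ := succ_div_mod_of_mod_eq k j hk hge
    have hwrap : (j / k) % pat.length + 1 = pat.length := by omega
    have hidx : ((j + 1) / k) % pat.length = 0 := by
      rw [hdiv, ← Nat.mod_add_mod, hwrap, Nat.mod_self]
    rw [hidx, hmod]
    simp [PySem.List.pyGet?_zero, List.getD_eq_getElem?_getD]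
  · -- number_occurred ≥ k, pattern index advances
    have hge : j % k = k - 1 := by omega
    obtain ⟨hdiv, hmod⟩ := succ_div_mod_of_mod_eq k j hk hge
    have hidx : ((j + 1) / k) % pat.length = (j / k) % pat.length + 1 := by
      rw [hdiv, ← Nat.mod_add_mod]
      exact Nat.mod_eq_of_lt (by omega)
    rw [hidx, hmod]
    rw [show (((j / k) % pat.length : Nat) : Int) + 1 = (((j / k) % pat.length + 1 : Nat) : Int)
      from by push_cast; ring]
    rw [key]
    simp
  · -- number_occurred < k: index unchanged
    have hlt : j % k + 1 < k := by omega
    obtain ⟨hdiv, hmod⟩ := succ_div_mod_of_mod_lt k j hlt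
    have hidx : ((j + 1) / k) % pat.length = (j / k) % pat.length := by rw [hdiv]
    rw [hidx, hmod, key]
    simp

-- A's inner loop computes specSum
lemma foldA (pat : List Int) (k : Nat) (hp : pat ≠ []) (hk : 0 < k) :
    ∀ (ys : List Int) (j : Nat) (s : Int),
      ys.foldl
        (fun (acc : (Int × Int) × Int) value =>
          let y := seqNext pat (k : Int) acc.1
          (y.2, acc.2 + y.1 * value))
        (stateOf k pat.length j, s)
      = (stateOf k pat.length (j + ys.length), s + specSum pat k j ys) := by
  intro ys
  induction ys with
  | nil => intro j s; simp [specSum]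
  | cons v r ih =>
    intro j s
    simp only [List.foldl_cons, seqNext_stateOf pat k j hp hk]
    rw [ih (j + 1)]
    simp only [specSum, List.length_cons, Prod.mk.injEq]
    constructor
    · congr 1
      omega
    · ring

-- B's prefix list: tail of the running sums
def tailScan (a : Int) : List Int → List Int
  | [] => []
  | v :: r => (a + v) :: tailScan (a + v) r

lemma buildPrefix_fold (xs : List Int) :
    ∀ (p : List Int) (a : Int), p.getLast? = some a →
      xs.foldl (fun p v => p ++ [(PySem.List.pyGet? p (-1)).getD 0 + v]) p = p ++ tailScan a xs := by
  induction xs with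
  | nil => intro p a _; simp [tailScan]
  | cons v r ih =>
    intro p a hlast
    rw [List.foldl_cons]
    have hstep : (PySem.List.pyGet? p (-1)).getD 0 = a := by
      rw [PySem.List.pyGet?_neg_one, hlast]
      rfl
    rw [hstep, ih (p ++ [a + v]) (a + v) List.getLast?_concat]
    simp [tailScan]

lemma buildPrefix_eq (xs : List Int) : buildPrefix xs = 0 :: tailScan 0 xs := by
  unfold buildPrefix
  rw [buildPrefix_fold xs [0] 0 rfl]
  simp

lemma tailScan_getElem? :
    ∀ (xs : List Int) (a : Int) (i : Nat), i < xs.length →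
      (tailScan a xs)[i]? = some (a + (xs.take (i + 1)).sum) := by
  intro xs
  induction xs with
  | nil => intro a i h; simp at h
  | cons v r ih =>
    intro a i h
    cases i with
    | zero => simp [tailScan]
    | succ i =>
      simp only [tailScan, List.getElem?_cons_succ]
      rw [ih (a + v) i (by simpa using h)]
      simp [add_assoc]

lemma pfx_get (xs : List Int) (i : Nat) (h : i ≤ xs.length) :
    (PySem.List.pyGet? (buildPrefix xs) ((i : Nat) : Int)).getD 0 = (xs.take i).sum := by
  rw [buildPrefix_eq, PySem.List.pyGet?_natCast]
  cases i with
  | zero => simp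
  | succ i =>
    simp only [List.getElem?_cons_succ]
    rw [tailScan_getElem? xs 0 i (by omega)]
    simp

-- splitting the spec sum at a block of constant coefficient
lemma specSum_block (pat : List Int) (k : Nat) :
    ∀ (m j : Nat) (ys : List Int) (C : Int),
      (∀ i, i < m → pat.getD (((j + i + 1) / k) % pat.length) 0 = C) →
      specSum pat k j ys = C * (ys.take m).sum + specSum pat k (j + m) (ys.drop m) := by
  intro m
  induction m with
  | zero => intro j ys C _; simp
  | succ m ih =>
    intro j ys C hC
    cases ys with
    | nil => simp [specSum]
    | cons v r =>
      simp only [specSum, List.take_succ_cons, List.drop_succ_cons, List.sum_cons]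
      rw [hC 0 (by omega), ih (j + 1) r C (fun i hi => by
        have := hC (i + 1) (by omega)
        convert this using 4
        omega)]
      rw [show j + 1 + m = j + (m + 1) by omega]
      ring

lemma take_sum_split (xs : List Int) (s e : Nat) (h : s ≤ e) :
    (xs.take e).sum = (xs.take s).sum + ((xs.drop s).take (e - s)).sum := by
  conv_lhs => rw [show e = s + (e - s) from by omega]
  rw [List.take_add, List.sum_append]

lemma blockLoop_done (pat pfxl : List Int) (n k : Int) :
    ∀ (fuel : Nat) (b start : Int) (total : Int), n ≤ start →
      blockLoop pat pfxl n k fuel b start total = total := by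
  intro fuel
  cases fuel with
  | zero => intro _ _ _ _; rfl
  | succ fuel => intro b start total h; simp [blockLoop, not_lt.mpr h]

lemma blockLoop_eq (xs pat : List Int) (hp : pat ≠ []) (k : Nat) (hk : 0 < k) :
    ∀ (fuel b start : Nat) (total : Int),
      1 ≤ b → start + 1 = b * k → start ≤ xs.length → xs.length - start ≤ fuel →
      blockLoop pat (buildPrefix xs) (xs.length : Int) (k : Int) fuel (b : Int) (start : Int) total
        = total + specSum pat k start (xs.drop start) := by
  have hL : 0 < pat.length := List.length_pos_iff.mpr hp
  intro fuel
  induction fuel with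
  | zero =>
    intro b start total _ _ h1 h2
    have : start = xs.length := by omega
    subst this
    simp [blockLoop, specSum, List.drop_length]
  | succ fuel ih =>
    intro b start total hb hbk hsn hfuel
    by_cases hlt : start < xs.length
    · -- one iteration of the while loop
      have hen : min ((start : Int) + (k : Int)) (xs.length : Int)
          = ((min (start + k) xs.length : Nat) : Int) := by push_cast; omega
      set en : Nat := min (start + k) xs.length with hen_def
      have hens : start ≤ en := by omega
      have henn : en ≤ xs.length := Nat.min_le_right _ _
      have henk : en ≤ start + k := Nat.min_le_left _ _
      have hmul : (b + 1) * k = b * k + k := by ring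
      have hen_lb : start < en := by omega
      -- the coefficient pulled out of the pattern
      have hmodc : PySem.Int.mod (b : Int) (pat.length : Int) = ((b % pat.length : Nat) : Int) :=
        PySem.Int.mod_natCast b pat.length
      have hcoef : (PySem.List.pyGet? pat (PySem.Int.mod (b : Int) (pat.length : Int))).getD 0
          = pat.getD (b % pat.length) 0 := by
        rw [hmodc, PySem.List.pyGet?_natCast, List.getD_eq_getElem?_getD]
      -- the two prefix reads
      have hps : (PySem.List.pyGet? (buildPrefix xs) ((start : Nat) : Int)).getD 0 = (xs.take start).sum :=
        pfx_get xs start (by omega)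
      have hpe : (PySem.List.pyGet? (buildPrefix xs) ((en : Nat) : Int)).getD 0 = (xs.take en).sum :=
        pfx_get xs en henn
      -- block decomposition of the spec sum
      have hblock : specSum pat k start (xs.drop start)
          = pat.getD (b % pat.length) 0 * ((xs.drop start).take (en - start)).sum
            + specSum pat k en (xs.drop en) := by
        have := specSum_block pat k (en - start) start (xs.drop start) (pat.getD (b % pat.length) 0)
          (fun i hi => by
            have hdiv : (start + i + 1) / k = b := by
              apply Nat.div_eq_of_lt_le
              · omega
              · omega
            rw [hdiv])
        rw [this, List.drop_drop, show start + (en - start) = en from by omega]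
      have hsum : (xs.take en).sum - (xs.take start).sum = ((xs.drop start).take (en - start)).sum := by
        rw [take_sum_split xs start en hens]; ring
      -- unfold one loop iteration
      have hltI : (start : Int) < (xs.length : Int) := by exact_mod_cast hlt
      have hb1 : (b : Int) + 1 = ((b + 1 : Nat) : Int) := by push_cast; ring
      rw [blockLoop]
      simp only [if_pos hltI, hen, hb1, hcoef, hps, hpe]
      by_cases hcase : start + k ≤ xs.length
      · have hen2 : en = start + k := by omega
        rw [ih (b + 1) en _ (by omega) (by rw [hen2, Nat.succ_mul]; omega) henn (by omega)]
        rw [hblock, hsum]; ring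
      · have hen2 : en = xs.length := by omega
        rw [hblock, hsum,
          blockLoop_done pat (buildPrefix xs) _ _ fuel _ _ _ (by simp [hen2])]
        rw [hen2]
        simp [specSum, List.drop_length]
    · have : start = xs.length := by omega
      subst this
      have hltI : ¬ ((xs.length : Int) < (xs.length : Int)) := by omega
      rw [blockLoop]
      simp only [if_neg hltI]
      simp [specSum, List.drop_length]

-- row k of A equals the spec sum
lemma rowA_eq (xs pat : List Int) (hp : pat ≠ []) (k : Nat) (hk : 0 < k) :
    (xs.foldl
      (fun (acc : (Int × Int) × Int) value =>
        let y := seqNext pat (k : Int) acc.1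
        (y.2, acc.2 + y.1 * value))
      (((0 : Int), (1 : Int)), (0 : Int))).2 = specSum pat k 0 xs := by
  have h0 : (((0 : Int), (1 : Int)) : Int × Int) = stateOf k pat.length 0 := by
    simp [stateOf]
  rw [h0, foldA pat k hp hk xs 0 0]
  simp

-- row k of B equals the spec sum
lemma rowB_eq (xs pat : List Int) (hp : pat ≠ []) (k : Nat) (hk : 0 < k) (hkn : k ≤ xs.length) :
    blockLoop pat (buildPrefix xs) (xs.length : Int) (k : Int) xs.length 1 ((k : Int) - 1)
      ((PySem.List.pyGet? pat 0).getD 0 *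
        (PySem.List.pyGet? (buildPrefix xs) ((k : Int) - 1)).getD 0)
      = specSum pat k 0 xs := by
  have hL : 0 < pat.length := List.length_pos_iff.mpr hp
  have hk1 : (k : Int) - 1 = ((k - 1 : Nat) : Int) := by omega
  have hp0 : (PySem.List.pyGet? pat 0).getD 0 = pat.getD 0 0 := by
    rw [PySem.List.pyGet?_zero, List.getD_eq_getElem?_getD]
  rw [hk1, hp0, pfx_get xs (k - 1) (by omega)]
  rw [show (1 : Int) = ((1 : Nat) : Int) by norm_num]
  rw [blockLoop_eq xs pat hp k hk xs.length 1 (k - 1) _ (le_refl 1) (by omega) (by omega) (by omega)]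
  have := specSum_block pat k (k - 1) 0 xs (pat.getD 0 0)
    (fun i hi => by
      have hdiv : (0 + i + 1) / k = 0 := Nat.div_eq_of_lt (by omega)
      rw [hdiv, Nat.zero_mod])
  rw [this]
  simp only [Nat.zero_add]

-- ===== VERDICT (by name: the statement is the Claim_ definition above) =====
theorem execute_phase_spec : Claim_equal_execute_phase := by
  intro input_data sequence_pattern _ hpre
  unfold Spec_execute_phase
  rcases hpre with hnil | hp
  · subst hnil
    rfl
  · simp only [execute_phase, execute_phase_alt, extract_ones_position,
      PySem.List.foldl_append_singleton_eq_map, List.nil_append]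
    apply List.map_congr_left
    intro x hx
    rw [PySem.List.mem_pyRange_one] at hx
    obtain ⟨hx1, hx2⟩ := hx
    have hxk : x = ((x.toNat : Nat) : Int) := by omega
    set k : Nat := x.toNat with hkdef
    have hk : 0 < k := by omega
    have hkn : k ≤ input_data.length := by omega
    rw [hxk]
    rw [rowA_eq input_data sequence_pattern hp k hk]
    rw [rowB_eq input_data sequence_pattern hp k hk hkn]
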